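-- pv_equiv track=rewrite | github.com/nichezhep/natdatastructure | exericise/reading_recursion.py | mystery_one
-- ===== SOURCE A (Python) =====
-- def mystery_one(x, y):
--
--     if y <= 0:
--         return x
--
--     elif y > 10:
--         y = y//2
--         return mystery_one(x, y)
--
--     else:
--         x = x + 1
--         return mystery_one(x, y - 1)
-- ===== SOURCE B (Python) =====
-- def mystery_one(x, y):
--     if y <= 0:
--         return x
--     while y > 10:
--         y = y // 2
--     return x + y
-- ===== Notes on version B (the rewrite author's own statement) =====
-- stated objective: simpler
-- what changed: Replaced the two-branch recursion by an iterative halving loop plus a closed-form addition: the decrement-and-increment phase collapses to 'return x + y'.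
import Mathlib
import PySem

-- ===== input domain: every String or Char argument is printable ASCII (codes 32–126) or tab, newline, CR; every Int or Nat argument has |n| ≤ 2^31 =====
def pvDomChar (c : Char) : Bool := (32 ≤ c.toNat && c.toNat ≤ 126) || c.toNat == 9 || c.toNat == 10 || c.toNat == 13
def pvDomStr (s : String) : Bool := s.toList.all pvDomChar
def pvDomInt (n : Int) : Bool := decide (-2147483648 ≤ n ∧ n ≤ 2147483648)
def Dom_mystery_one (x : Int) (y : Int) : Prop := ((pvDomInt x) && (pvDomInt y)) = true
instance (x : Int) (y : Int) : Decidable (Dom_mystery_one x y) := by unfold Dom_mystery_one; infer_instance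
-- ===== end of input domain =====

-- B replaces A's two-branch recursion by an iterative halving loop plus the closed form x + y (simpler).

-- ===== PORT A =====
def mystery_one (x : Int) (y : Int) : Int :=
  if y ≤ 0 then x
  else if y > 10 then mystery_one x (PySem.Int.floordiv y 2)
  else mystery_one (x + 1) (y - 1)
termination_by y.toNat
decreasing_by
  · have h2 : PySem.Int.floordiv y 2 = y / 2 := PySem.Int.floordiv_eq_ediv_of_pos (by omega)
    rw [h2]; omega
  · omega

-- ===== PORT B =====
-- the 'while y > 10: y //= 2' loop of Source B
def pvHalve (y : Int) : Int :=
  if y > 10 then pvHalve (PySem.Int.floordiv y 2) else y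
termination_by y.toNat
decreasing_by
  have h2 : PySem.Int.floordiv y 2 = y / 2 := PySem.Int.floordiv_eq_ediv_of_pos (by omega)
  rw [h2]; omega

def mystery_one_alt (x : Int) (y : Int) : Int :=
  if y ≤ 0 then x else x + pvHalve y

-- ===== PRECONDITION & SPEC =====
def Spec_mystery_one (x : Int) (y : Int) (out : Int) : Prop := out = mystery_one_alt x y
instance (x : Int) (y : Int) (out : Int) : Decidable (Spec_mystery_one x y out) := by unfold Spec_mystery_one; infer_instance

-- ===== CLAIM (what is proved, stated in full; the proofs are below) =====
def Claim_equal_mystery_one : Prop := ∀ (x : Int) (y : Int), Dom_mystery_one x y → Spec_mystery_one x y (mystery_one x y)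

-- ===== LEMMAS AND PROOFS =====

-- decrement phase: for 0 ≤ y ≤ 10, A returns x + y
theorem mystery_one_small (y : Int) (hy0 : 0 ≤ y) (hy : y ≤ 10) :
    ∀ x : Int, mystery_one x y = x + y := by
  have h : ∀ n : Nat, ∀ y : Int, y.toNat = n → 0 ≤ y → y ≤ 10 → ∀ x : Int, mystery_one x y = x + y := by
    intro n
    induction n with
    | zero => intro y hn h0 h10 x; rw [mystery_one]; simp [show y = 0 by omega]
    | succ k ih =>
      intro y hn h0 h10 x
      rw [mystery_one]
      have hpos : ¬ y ≤ 0 := by omega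
      simp only [hpos, if_false, show ¬ y > 10 by omega, if_false]
      rw [ih (y - 1) (by omega) (by omega) (by omega)]
      ring
  exact h y.toNat y rfl hy0 hy

theorem mystery_one_eq_alt (y : Int) : ∀ x : Int, mystery_one x y = mystery_one_alt x y := by
  have h : ∀ n : Nat, ∀ y : Int, y.toNat = n → ∀ x : Int, mystery_one x y = mystery_one_alt x y := by
    intro n
    induction n using Nat.strong_induction_on with
    | _ n ih =>
      intro y hn x
      by_cases h0 : y ≤ 0
      · rw [mystery_one, mystery_one_alt]; simp [h0]
      · by_cases h10 : y > 10
        · have hfd : PySem.Int.floordiv y 2 = y / 2 := PySem.Int.floordiv_eq_ediv_of_pos (by omega)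
          rw [mystery_one]
          simp only [h0, if_false, h10, if_true]
          rw [ih (PySem.Int.floordiv y 2).toNat (by rw [hfd]; omega) _ rfl]
          rw [mystery_one_alt, mystery_one_alt]
          simp only [h0, if_false, show ¬ PySem.Int.floordiv y 2 ≤ 0 by rw [hfd]; omega, if_false]
          congr 1
          conv_rhs => rw [pvHalve]
          simp [h10]
        · rw [mystery_one_small y (by omega) (by omega)]
          rw [mystery_one_alt]
          simp only [h0, if_false]
          rw [pvHalve]
          simp [h10]
  exact h y.toNat y rfl

-- ===== VERDICT (by name: the statement is the Claim_ definition above) =====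
theorem mystery_one_spec : Claim_equal_mystery_one := by
  intro x y _
  exact mystery_one_eq_alt y x
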